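-- pv_equiv track=rewrite | github.com/Huffman-cotdom/Technology_reserve_box | LeetCode/数组/最小和最大的N个数.py | N_nums
-- ===== SOURCE A (Python) =====
-- def N_nums(nums, N):
-- 	length = len(nums)
-- 	if len(set(nums)) < length:
-- 		return -1
-- 	res = 0
-- 	nums.sort()
-- 	for i in range(N):
-- 		res += nums[i]
-- 	nums.sort(reverse=True)
-- 	for i in range(N):
-- 		res += nums[i]
-- 	return res
-- ===== SOURCE B (Python) =====
-- def N_nums(nums, N):
--     # Selection by repeated extraction: no sorting at all. Pull the minimum out
--     # of a working copy N times, then the maximum N times, summing as we go.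
--     if len(set(nums)) < len(nums):
--         return -1
--     res = 0
--     rest = list(nums)
--     for _ in range(N):
--         m = min(rest)
--         res += m
--         rest.remove(m)
--     rest = list(nums)
--     for _ in range(N):
--         m = max(rest)
--         res += m
--         rest.remove(m)
--     return res
-- ===== Notes on version B (the rewrite author's own statement) =====
-- stated objective: alternative
-- what changed: B never sorts: it selects the N smallest (and N largest) by N rounds of extract-min (extract-max) from a working copy, summing each extracted element, instead of A's two full sorts with indexed loops.
import Mathlib
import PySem

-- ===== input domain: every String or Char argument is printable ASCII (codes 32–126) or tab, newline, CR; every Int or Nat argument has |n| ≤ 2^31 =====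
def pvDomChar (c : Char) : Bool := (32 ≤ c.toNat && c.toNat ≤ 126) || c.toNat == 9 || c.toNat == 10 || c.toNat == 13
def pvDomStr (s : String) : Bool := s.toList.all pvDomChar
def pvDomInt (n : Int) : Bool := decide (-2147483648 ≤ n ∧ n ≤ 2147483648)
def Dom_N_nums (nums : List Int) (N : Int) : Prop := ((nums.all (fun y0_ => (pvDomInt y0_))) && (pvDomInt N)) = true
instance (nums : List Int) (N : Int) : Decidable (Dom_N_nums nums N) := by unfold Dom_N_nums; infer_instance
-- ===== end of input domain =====

-- B selects the N smallest / N largest by N rounds of extract-min / extract-max (no sort)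
-- instead of A's two full sorts; equivalence is about the RETURN value only (A sorts nums in place).

-- ===== PORT A =====
def N_nums (nums : List Int) (N : Int) : Int :=
  let length : Int := nums.length
  if ((PySem.Set.ofList nums).length : Int) < length then -1
  else
    -- nums.sort(); for i in range(N): res += nums[i]
    let s := PySem.List.sorted nums (fun x => x) false
    let res := (PySem.List.pyRange 0 N 1).foldl (fun res i => res + PySem.List.pyGetD s i 0) 0
    -- nums.sort(reverse=True); for i in range(N): res += nums[i]
    let t := PySem.List.sorted s (fun x => x) true
    (PySem.List.pyRange 0 N 1).foldl (fun res i => res + PySem.List.pyGetD t i 0) res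

-- ===== PORT B =====
-- one extract-min step: m = min(rest); res += m; rest.remove(m)
-- (Python raises on an empty rest — excluded by Pre_; the none branch keeps the state)
def pvExtractMin (st : Int × List Int) : Int × List Int :=
  match PySem.List.min? st.2 (fun x => x) with
  | none => st
  | some m => (st.1 + m, (PySem.List.remove? st.2 m).getD st.2)

def pvExtractMax (st : Int × List Int) : Int × List Int :=
  match PySem.List.max? st.2 (fun x => x) with
  | none => st
  | some m => (st.1 + m, (PySem.List.remove? st.2 m).getD st.2)

def N_nums_alt (nums : List Int) (N : Int) : Int :=
  if ((PySem.Set.ofList nums).length : Int) < (nums.length : Int) then -1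
  else
    let p1 := (PySem.List.pyRange 0 N 1).foldl (fun st _ => pvExtractMin st) ((0 : Int), nums)
    let p2 := (PySem.List.pyRange 0 N 1).foldl (fun st _ => pvExtractMax st) (p1.1, nums)
    p2.1

-- ===== PRECONDITION & SPEC =====
-- Pre_ excludes exactly the inputs where A raises IndexError (and B ValueError):
-- duplicate-free lists with N > len(nums).
def Pre_N_nums (nums : List Int) (N : Int) : Prop := ¬ nums.Nodup ∨ N ≤ (nums.length : Int)
instance (nums : List Int) (N : Int) : Decidable (Pre_N_nums nums N) := by unfold Pre_N_nums; infer_instance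
def pvWitness_N_nums : List Int × Int := ([3, 1, 2], 2)

def Spec_N_nums (nums : List Int) (N : Int) (out : Int) : Prop := out = N_nums_alt nums N
instance (nums : List Int) (N : Int) (out : Int) : Decidable (Spec_N_nums nums N out) := by unfold Spec_N_nums; infer_instance

-- ===== CLAIM (what is proved, stated in full; the proofs are below) =====
def Claim_equal_N_nums : Prop := ∀ (nums : List Int) (N : Int), Dom_N_nums nums N → Pre_N_nums nums N → Spec_N_nums nums N (N_nums nums N)

-- ===== LEMMAS AND PROOFS =====
-- len(set(xs)) < len(xs)  ↔  xs has a duplicate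
theorem ofList_length_lt_iff (xs : List Int) :
    (((PySem.Set.ofList xs).length : Int) < (xs.length : Int)) ↔ ¬ xs.Nodup := by
  have h1 : xs.toFinset = (PySem.Set.ofList xs).toFinset := by
    ext a; simp [List.mem_toFinset, PySem.Set.mem_ofList]
  have h2 : xs.toFinset.card = (PySem.Set.ofList xs).length := by
    rw [h1]; exact List.toFinset_card_of_nodup (PySem.Set.nodup_ofList xs)
  have h3 : xs.toFinset.card ≤ xs.length := List.toFinset_card_le (l := xs)
  have h4 : xs.toFinset.card = xs.length ↔ xs.Nodup := by
    simpa using (Multiset.toFinset_card_eq_card_iff_nodup (m := (xs : Multiset Int)))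
  rw [Int.ofNat_lt, ← h2]
  constructor
  · intro h hnd
    exact absurd (h4.mpr hnd) (Nat.ne_of_lt h)
  · intro h
    exact lt_of_le_of_ne h3 (fun heq => h (h4.mp heq))

-- a fold whose step ignores the list element is an iterate of the step
theorem foldl_const_iterate {α β : Type} (f : α → α) :
    ∀ (l : List β) (init : α), l.foldl (fun st _ => f st) init = f^[l.length] init := by
  intro l
  induction l with
  | nil => intro init; simp
  | cons x t ih => intro init; simp [List.foldl_cons, ih, Function.iterate_succ_apply]

-- k rounds of extract-min, when the working list is a permutation of an
-- ascending-sorted s with k ≤ |s|, add sum(take k s) and leave a permutation of drop k s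
theorem iterate_extractMin : ∀ (k : Nat) (s rest : List Int) (init : Int),
    rest.Perm s → s.Pairwise (· ≤ ·) → k ≤ s.length →
    pvExtractMin^[k] (init, rest) = (init + (s.take k).sum, (pvExtractMin^[k] (init, rest)).2) ∧
      (pvExtractMin^[k] (init, rest)).2.Perm (s.drop k) := by
  intro k
  induction k with
  | zero => intro s rest init hperm _ _; simpa using hperm
  | succ k ih =>
    intro s rest init hperm hpair hk
    match s, hk with
    | m :: t, hk =>
      have hm_rest : m ∈ rest := hperm.mem_iff.mpr (List.mem_cons_self ..)
      rcases List.pairwise_cons.mp hpair with ⟨hmle, hpt⟩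
      -- min? rest = some m
      have hne : rest ≠ [] := by
        intro h; rw [h] at hm_rest; exact absurd hm_rest (List.not_mem_nil)
      obtain ⟨v, hv⟩ : ∃ v, PySem.List.min? rest (fun x => x) = some v := by
        cases hmin : PySem.List.min? rest (fun x => x) with
        | none => exact absurd ((PySem.List.min?_eq_none_iff ..).mp hmin) hne
        | some v => exact ⟨v, rfl⟩
      have hv_mem : v ∈ rest := PySem.List.min?_mem hv
      have hvm : v = m := by
        have h1 : v ≤ m := PySem.List.min?_isMin hv m hm_rest
        have h2 : m ≤ v := by
          rcases List.mem_cons.mp (hperm.mem_iff.mp hv_mem) with h | h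
          · omega
          · exact hmle v h
        omega
      subst hvm
      have hstep : pvExtractMin (init, rest) = (init + v, rest.erase v) := by
        unfold pvExtractMin
        rw [hv]
        simp [PySem.List.remove?_eq_some_erase rest v hm_rest]
      have hperm' : (rest.erase v).Perm t := by
        have := hperm.erase v
        rwa [List.erase_cons_head] at this
      have ih' := ih t (rest.erase v) (init + v) hperm' hpt (by simpa using hk)
      rw [Function.iterate_succ_apply, hstep]
      constructor
      · have : init + v + (t.take k).sum = init + ((v :: t).take (k + 1)).sum := by
          simp [List.take_succ_cons]; ring
        rw [ih'.1, this]
      · simpa using ih'.2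

-- the mirrored lemma for extract-max over a descending-sorted s
theorem iterate_extractMax : ∀ (k : Nat) (s rest : List Int) (init : Int),
    rest.Perm s → s.Pairwise (fun a b => b ≤ a) → k ≤ s.length →
    pvExtractMax^[k] (init, rest) = (init + (s.take k).sum, (pvExtractMax^[k] (init, rest)).2) ∧
      (pvExtractMax^[k] (init, rest)).2.Perm (s.drop k) := by
  intro k
  induction k with
  | zero => intro s rest init hperm _ _; simpa using hperm
  | succ k ih =>
    intro s rest init hperm hpair hk
    match s, hk with
    | m :: t, hk =>
      have hm_rest : m ∈ rest := hperm.mem_iff.mpr (List.mem_cons_self ..)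
      rcases List.pairwise_cons.mp hpair with ⟨hmge, hpt⟩
      have hne : rest ≠ [] := by
        intro h; rw [h] at hm_rest; exact absurd hm_rest (List.not_mem_nil)
      obtain ⟨v, hv⟩ : ∃ v, PySem.List.max? rest (fun x => x) = some v := by
        cases hmax : PySem.List.max? rest (fun x => x) with
        | none => exact absurd ((PySem.List.max?_eq_none_iff ..).mp hmax) hne
        | some v => exact ⟨v, rfl⟩
      have hv_mem : v ∈ rest := PySem.List.max?_mem hv
      have hvm : v = m := by
        have h1 : m ≤ v := PySem.List.max?_isMax hv m hm_rest
        have h2 : v ≤ m := by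
          rcases List.mem_cons.mp (hperm.mem_iff.mp hv_mem) with h | h
          · omega
          · exact hmge v h
        omega
      subst hvm
      have hstep : pvExtractMax (init, rest) = (init + v, rest.erase v) := by
        unfold pvExtractMax
        rw [hv]
        simp [PySem.List.remove?_eq_some_erase rest v hm_rest]
      have hperm' : (rest.erase v).Perm t := by
        have := hperm.erase v
        rwa [List.erase_cons_head] at this
      have ih' := ih t (rest.erase v) (init + v) hperm' hpt (by simpa using hk)
      rw [Function.iterate_succ_apply, hstep]
      constructor
      · have : init + v + (t.take k).sum = init + ((v :: t).take (k + 1)).sum := by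
          simp [List.take_succ_cons]; ring
        rw [ih'.1, this]
      · simpa using ih'.2

-- A's indexing loop over range(n) sums the first n elements of the sorted list
theorem loop_sum (s : List Int) : ∀ (n : Nat), n ≤ s.length → ∀ (init : Int),
    (PySem.List.pyRange 0 (n : Int) 1).foldl (fun res i => res + PySem.List.pyGetD s i 0) init
      = init + (s.take n).sum := by
  intro n
  induction n with
  | zero => intro _ init; simp [PySem.List.pyRange_one_eq_nil]
  | succ n ih =>
    intro hn init
    have hlt : n < s.length := by omega
    have hcast : ((n + 1 : Nat) : Int) = (n : Int) + 1 := by push_cast; ring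
    have htake : (s.take (n + 1)).sum = (s.take n).sum + s[n] := List.sum_take_succ s n hlt
    rw [hcast, PySem.List.pyRange_one_succ_right (by positivity), List.foldl_append,
      ih (by omega) init]
    simp only [List.foldl_cons, List.foldl_nil, PySem.List.pyGetD_natCast]
    rw [htake]
    have hgetD : s.getD n 0 = s[n] := by
      simp [List.getD, List.getElem?_eq_getElem hlt]
    rw [hgetD]
    ring

theorem N_nums_spec : Claim_equal_N_nums := by
  intro nums N _ hpre
  unfold Spec_N_nums N_nums N_nums_alt
  simp only []
  by_cases hdup : ((PySem.Set.ofList nums).length : Int) < (nums.length : Int)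
  · rw [if_pos hdup, if_pos hdup]
  · rw [if_neg hdup, if_neg hdup]
    have hnd : nums.Nodup := by
      by_contra h; exact hdup ((ofList_length_lt_iff nums).mpr h)
    have hN : N ≤ (nums.length : Int) := by
      rcases hpre with h | h
      · exact absurd hnd h
      · exact h
    set s := PySem.List.sorted nums (fun x => x) false with hs
    set t := PySem.List.sorted s (fun x => x) true with ht
    have hps : nums.Perm s := (PySem.List.sorted_perm ..).symm
    have hpt : nums.Perm t := hps.trans (PySem.List.sorted_perm ..).symm
    have hpairs : s.Pairwise (· ≤ ·) := PySem.List.sorted_pairwise ..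
    have hpairt : t.Pairwise (fun a b => b ≤ a) := PySem.List.sorted_pairwise_rev ..
    have hlens : s.length = nums.length := hps.length_eq.symm
    have hlent : t.length = nums.length := hpt.length_eq.symm
    by_cases hNpos : 0 ≤ N
    · obtain ⟨n, rfl⟩ : ∃ n : Nat, N = (n : Int) := ⟨N.toNat, (Int.toNat_of_nonneg hNpos).symm⟩
      have hns : n ≤ s.length := by omega
      have hnt : n ≤ t.length := by omega
      -- A's side
      rw [loop_sum s n hns 0, loop_sum t n hnt (0 + (s.take n).sum)]
      -- B's side
      have hrangelen : (PySem.List.pyRange 0 (n : Int) 1).length = n := by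
        rw [PySem.List.length_pyRange_one]; omega
      rw [foldl_const_iterate pvExtractMin _ ((0 : Int), nums), hrangelen]
      obtain ⟨h1, _⟩ := iterate_extractMin n s nums 0 hps hpairs hns
      rw [h1]
      rw [foldl_const_iterate pvExtractMax _ (0 + (s.take n).sum, nums), hrangelen]
      obtain ⟨h2, _⟩ := iterate_extractMax n t nums (0 + (s.take n).sum) hpt hpairt hnt
      rw [h2]
    · have : PySem.List.pyRange 0 N 1 = [] := PySem.List.pyRange_one_eq_nil (by omega)
      rw [this]
      simp
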